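-- pv_equiv track=rewrite | github.com/Ledvin25/Personal | TEC/Semestre 1/Taller/Tareas/Tarea7_Ledvin_Manuel_Leiva_Mata.py | tipo_matriz_p_helper
-- ===== SOURCE A (Python) =====
-- def tipo_matriz_p_helper(matriz, tipo, fila, columna):
--     if fila < 0:
--         return matriz
--
--     if columna < 0:
--         return tipo_matriz_p_helper(matriz, tipo, fila-1, len(matriz[0])-1)
--
--     if tipo == 1:
--         if fila > columna:
--             matriz[fila][columna] = 0
--     elif tipo == 2:
--         if fila < columna:
--             matriz[fila][columna] = 0
--     elif tipo == 3:
--         if fila != columna: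
--             matriz[fila][columna] = 0
--
--     return tipo_matriz_p_helper(matriz, tipo, fila, columna-1)
-- ===== SOURCE B (Python) =====
-- # Iterative re-implementation: nested loops mutate the same matrix in place
-- # (same mutation side effect as A), instead of A's cell-by-cell recursion.
-- def _zero(matriz, tipo, f, c):
--     if tipo == 1:
--         if f > c:
--             matriz[f][c] = 0
--     elif tipo == 2:
--         if f < c:
--             matriz[f][c] = 0
--     elif tipo == 3:
--         if f != c:
--             matriz[f][c] = 0
--
-- def tipo_matriz_p_helper(matriz, tipo, fila, columna):
--     if fila < 0:
--         return matriz
--     for c in range(columna, -1, -1):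
--         _zero(matriz, tipo, fila, c)
--     for f in range(fila - 1, -1, -1):
--         for c in range(len(matriz[0]) - 1, -1, -1):
--             _zero(matriz, tipo, f, c)
--     return matriz
-- ===== Notes on version B (the rewrite author's own statement) =====
-- stated objective: simpler
-- what changed: Replaces A's cell-by-cell recursion (one call per matrix cell, with a sentinel columna<0 call per row) by a plain iterative version: one loop over the partial first row, then two nested loops over the remaining rows, mutating and returning the same matrix.
import Mathlib
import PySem

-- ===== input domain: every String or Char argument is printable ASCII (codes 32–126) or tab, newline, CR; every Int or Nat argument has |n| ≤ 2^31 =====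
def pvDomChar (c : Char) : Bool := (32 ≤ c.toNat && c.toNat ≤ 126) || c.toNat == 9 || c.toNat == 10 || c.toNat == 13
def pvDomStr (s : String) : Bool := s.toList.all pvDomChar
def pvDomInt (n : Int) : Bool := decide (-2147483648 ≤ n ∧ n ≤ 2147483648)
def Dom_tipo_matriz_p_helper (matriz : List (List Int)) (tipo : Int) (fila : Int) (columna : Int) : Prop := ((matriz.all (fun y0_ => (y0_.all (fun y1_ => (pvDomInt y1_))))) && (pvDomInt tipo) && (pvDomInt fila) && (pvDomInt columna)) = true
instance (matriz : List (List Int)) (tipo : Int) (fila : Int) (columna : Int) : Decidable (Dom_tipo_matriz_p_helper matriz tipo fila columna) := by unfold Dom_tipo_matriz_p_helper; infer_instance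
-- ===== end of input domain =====

-- B replaces A's cell-by-cell recursion by iterative nested loops (one loop for the
-- partial first row, then full loops for the rows below); the equivalence proved is
-- about the RETURN value (both Pythons also mutate the argument matrix in place to
-- the same final state, cell order aside).

-- `matriz[f][c] = 0` on in-range nonnegative indices (outside Pre_ the Python raises
-- IndexError; this functional update is only exact inside Pre_).
def pvSetCell (m : List (List Int)) (f c : Int) : List (List Int) :=
  m.set f.toNat ((m.getD f.toNat []).set c.toNat 0)

-- ===== PORT A =====
def tipo_matriz_p_helper (matriz : List (List Int)) (tipo : Int) (fila : Int) (columna : Int) : List (List Int) :=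
  if fila < 0 then matriz
  else if columna < 0 then
    tipo_matriz_p_helper matriz tipo (fila - 1) (((matriz.getD 0 []).length : Int) - 1)
  else
    let m :=
      if tipo = 1 then (if fila > columna then pvSetCell matriz fila columna else matriz)
      else if tipo = 2 then (if fila < columna then pvSetCell matriz fila columna else matriz)
      else if tipo = 3 then (if fila ≠ columna then pvSetCell matriz fila columna else matriz)
      else matriz
    tipo_matriz_p_helper m tipo fila (columna - 1)
termination_by ((fila + 1).toNat, (columna + 1).toNat)
decreasing_by
  · left; omega
  · right; omega

-- ===== PORT B =====
-- the `_zero` helper of Source B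
def pvZero (m : List (List Int)) (tipo f c : Int) : List (List Int) :=
  if tipo = 1 then (if f > c then pvSetCell m f c else m)
  else if tipo = 2 then (if f < c then pvSetCell m f c else m)
  else if tipo = 3 then (if f ≠ c then pvSetCell m f c else m)
  else m

def tipo_matriz_p_helper_alt (matriz : List (List Int)) (tipo : Int) (fila : Int) (columna : Int) : List (List Int) :=
  if fila < 0 then matriz
  else
    let m1 := (PySem.List.pyRange columna (-1) (-1)).foldl (fun m c => pvZero m tipo fila c) matriz
    (PySem.List.pyRange (fila - 1) (-1) (-1)).foldl
      (fun m f =>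
        (PySem.List.pyRange (((m.getD 0 []).length : Int) - 1) (-1) (-1)).foldl
          (fun m' c => pvZero m' tipo f c) m) m1

-- ===== PRECONDITION & SPEC =====
-- Pre_ holds exactly on the inputs where the Python A returns normally: fila < 0, or a
-- nonempty matriz on which every cell the zeroing condition fires on (row fila at columns
-- columna..0, rows below at the full width of row 0) lies inside its row; everywhere else
-- A raises IndexError.
def Pre_tipo_matriz_p_helper (matriz : List (List Int)) (tipo : Int) (fila : Int) (columna : Int) : Prop :=
  fila < 0 ∨
    (matriz ≠ [] ∧
      -- row `fila` (columns columna..0): every fired zeroing lands in range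
      (tipo = 1 → 1 ≤ fila → 0 ≤ columna →
          fila < (matriz.length : Int) ∧
            min columna (fila - 1) < ((matriz.getD fila.toNat []).length : Int)) ∧
      (tipo = 2 → fila < columna →
          fila < (matriz.length : Int) ∧
            columna < ((matriz.getD fila.toNat []).length : Int)) ∧
      (tipo = 3 → 0 ≤ columna → ¬ (columna = 0 ∧ fila = 0) →
          fila < (matriz.length : Int) ∧
            (if columna = fila then columna - 1 else columna) <
              ((matriz.getD fila.toNat []).length : Int)) ∧
      -- rows below `fila`, at the full width of row 0
      (∀ f ∈ List.range (min fila (matriz.length : Int)).toNat,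
        ∀ c ∈ List.range (matriz.getD 0 []).length,
        ((tipo = 1 ∧ (c : Int) < (f : Int)) ∨ (tipo = 2 ∧ (f : Int) < (c : Int)) ∨
          (tipo = 3 ∧ (f : Int) ≠ (c : Int))) →
        c < (matriz.getD f []).length) ∧
      -- rows with index ≥ len(matriz) must never be zeroed at all
      (fila ≤ (matriz.length : Int) ∨ (matriz.getD 0 []).length = 0 ∨
        (tipo ≠ 1 ∧ tipo ≠ 3 ∧
          (tipo = 2 → ((matriz.getD 0 []).length : Int) - 1 ≤ (matriz.length : Int)))))

instance (matriz : List (List Int)) (tipo : Int) (fila : Int) (columna : Int) : Decidable (Pre_tipo_matriz_p_helper matriz tipo fila columna) := by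
  unfold Pre_tipo_matriz_p_helper
  exact @instDecidableOr _ _ inferInstance (@instDecidableAnd _ _ inferInstance
    (@instDecidableAnd _ _ inferInstance (@instDecidableAnd _ _ inferInstance
      (@instDecidableAnd _ _ inferInstance (@instDecidableAnd _ _ inferInstance inferInstance)))))

def pvWitness_tipo_matriz_p_helper : List (List Int) × Int × Int × Int :=
  ([[1, 2], [3, 4]], 1, 1, 1)

def Spec_tipo_matriz_p_helper (matriz : List (List Int)) (tipo : Int) (fila : Int) (columna : Int) (out : List (List Int)) : Prop := out = tipo_matriz_p_helper_alt matriz tipo fila columna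
instance (matriz : List (List Int)) (tipo : Int) (fila : Int) (columna : Int) (out : List (List Int)) : Decidable (Spec_tipo_matriz_p_helper matriz tipo fila columna out) := by unfold Spec_tipo_matriz_p_helper; infer_instance

-- ===== CLAIM (what is proved, stated in full; the proofs are below) =====
def Claim_equal_tipo_matriz_p_helper : Prop := ∀ (matriz : List (List Int)) (tipo : Int) (fila : Int) (columna : Int), Dom_tipo_matriz_p_helper matriz tipo fila columna → Pre_tipo_matriz_p_helper matriz tipo fila columna → Spec_tipo_matriz_p_helper matriz tipo fila columna (tipo_matriz_p_helper matriz tipo fila columna)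

-- ===== LEMMAS AND PROOFS =====

-- B's first loop over row `fila`, columns `columna` down to 0.
def pvRowFold (tipo fila : Int) (m : List (List Int)) (columna : Int) : List (List Int) :=
  (PySem.List.pyRange columna (-1) (-1)).foldl (fun m c => pvZero m tipo fila c) m

-- B's second (nested) loop over rows `f` down to 0, full width of the current matrix.
def pvRowsFold (tipo : Int) (m : List (List Int)) (f : Int) : List (List Int) :=
  (PySem.List.pyRange f (-1) (-1)).foldl
    (fun m f' => pvRowFold tipo f' m (((m.getD 0 []).length : Int) - 1)) m

lemma alt_eq (matriz : List (List Int)) (tipo fila columna : Int) (h : ¬ fila < 0) :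
    tipo_matriz_p_helper_alt matriz tipo fila columna =
      pvRowsFold tipo (pvRowFold tipo fila matriz columna) (fila - 1) := by
  simp only [tipo_matriz_p_helper_alt, pvRowsFold, pvRowFold, if_neg h]

-- A's recursion across one row equals B's first loop followed by A restarted on the row below.
lemma A_row (tipo fila : Int) (h : 0 ≤ fila) : ∀ (k : Nat) (columna : Int) (m : List (List Int)),
    (columna + 1).toNat = k →
    tipo_matriz_p_helper m tipo fila columna =
      tipo_matriz_p_helper (pvRowFold tipo fila m columna) tipo (fila - 1)
        ((((pvRowFold tipo fila m columna).getD 0 []).length : Int) - 1) := by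
  intro k
  induction k with
  | zero =>
    intro columna m hk
    have hc : columna < 0 := by omega
    have hr : pvRowFold tipo fila m columna = m := by
      unfold pvRowFold
      rw [PySem.List.pyRange_neg_one_eq_nil (by omega : columna ≤ (-1 : Int))]
      rfl
    rw [hr]
    rw [tipo_matriz_p_helper]
    simp only [if_neg (by omega : ¬ fila < 0), if_pos hc]
  | succ k ih =>
    intro columna m hk
    have hc : 0 ≤ columna := by omega
    have hr : pvRowFold tipo fila m columna =
        pvRowFold tipo fila (pvZero m tipo fila columna) (columna - 1) := by
      unfold pvRowFold
      rw [PySem.List.pyRange_neg_one_cons (by omega : (-1 : Int) < columna)]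
      rfl
    rw [hr]
    rw [tipo_matriz_p_helper]
    simp only [if_neg (by omega : ¬ fila < 0), if_neg (by omega : ¬ columna < 0)]
    have hstep :
        (if tipo = 1 then (if fila > columna then pvSetCell m fila columna else m)
         else if tipo = 2 then (if fila < columna then pvSetCell m fila columna else m)
         else if tipo = 3 then (if fila ≠ columna then pvSetCell m fila columna else m)
         else m) = pvZero m tipo fila columna := rfl
    rw [hstep]
    exact ih (columna - 1) (pvZero m tipo fila columna) (by omega)

-- A restarted at row `f` with the full current width equals B's nested loop from row `f` down.
lemma A_rows (tipo : Int) : ∀ (k : Nat) (f : Int) (m : List (List Int)),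
    (f + 1).toNat = k →
    tipo_matriz_p_helper m tipo f (((m.getD 0 []).length : Int) - 1) = pvRowsFold tipo m f := by
  intro k
  induction k with
  | zero =>
    intro f m hk
    have hf : f < 0 := by omega
    rw [tipo_matriz_p_helper]
    simp only [if_pos hf]
    unfold pvRowsFold
    rw [PySem.List.pyRange_neg_one_eq_nil (by omega : f ≤ (-1 : Int))]
    rfl
  | succ k ih =>
    intro f m hk
    have hf : 0 ≤ f := by omega
    have hR : pvRowsFold tipo m f =
        pvRowsFold tipo (pvRowFold tipo f m (((m.getD 0 []).length : Int) - 1)) (f - 1) := by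
      unfold pvRowsFold
      rw [PySem.List.pyRange_neg_one_cons (by omega : (-1 : Int) < f)]
      rfl
    rw [hR]
    rw [A_row tipo f hf ((((m.getD 0 []).length : Int) - 1) + 1).toNat _ m rfl]
    exact ih (f - 1) _ (by omega)

-- unconditional equality of the two ports
lemma ports_eq (matriz : List (List Int)) (tipo fila columna : Int) :
    tipo_matriz_p_helper matriz tipo fila columna =
      tipo_matriz_p_helper_alt matriz tipo fila columna := by
  by_cases h : fila < 0
  · rw [tipo_matriz_p_helper]
    simp only [if_pos h]
    rw [tipo_matriz_p_helper_alt]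
    simp only [if_pos h]
  · rw [alt_eq matriz tipo fila columna h]
    rw [A_row tipo fila (by omega) (columna + 1).toNat columna matriz rfl]
    exact A_rows tipo (fila - 1 + 1).toNat (fila - 1) _ (by omega)

-- ===== VERDICT (by name: the statement is the Claim_ definition above) =====
theorem tipo_matriz_p_helper_spec : Claim_equal_tipo_matriz_p_helper := by
  intro matriz tipo fila columna _ _
  unfold Spec_tipo_matriz_p_helper
  exact ports_eq matriz tipo fila columna
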